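-- pv_equiv track=rewrite | github.com/decoherencemedia/epstein-network | scripts/generate_static_search_pages_mem.py | first_pei_image_name_mem
-- ===== SOURCE A (Python) =====
-- def first_pei_image_name_mem(
--     pei_map: dict[str, set[str]], sorted_ids: tuple[str, ...]
-- ) -> str | None:
--     """Lexicographically first ``image_name`` in the qualifying set (``ORDER BY image_name``)."""
--     if not sorted_ids:
--         return None
--     sets = [pei_map.get(pid, set()) for pid in sorted_ids]
--     inter = set.intersection(*sets)
--     return min(inter) if inter else None
-- ===== SOURCE B (Python) =====
-- def first_pei_image_name_mem(
--     pei_map: dict[str, set[str]], sorted_ids: tuple[str, ...]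
-- ) -> str | None:
--     """Scan the first id's image names in sorted order; return the first one
--     present in every other id's set (no intersection materialized, early exit)."""
--     if not sorted_ids:
--         return None
--     others = [pei_map.get(pid, set()) for pid in sorted_ids[1:]]
--     for name in sorted(pei_map.get(sorted_ids[0], set())):
--         if all(name in s for s in others):
--             return name
--     return None
-- ===== Notes on version B (the rewrite author's own statement) =====
-- stated objective: alternative
-- what changed: Instead of materializing the full set intersection of all ids' sets and taking min, B sorts the first id's set once and scans it, returning the first name that is a member of every other id's set (early exit, no intersection built).
import Mathlib
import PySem

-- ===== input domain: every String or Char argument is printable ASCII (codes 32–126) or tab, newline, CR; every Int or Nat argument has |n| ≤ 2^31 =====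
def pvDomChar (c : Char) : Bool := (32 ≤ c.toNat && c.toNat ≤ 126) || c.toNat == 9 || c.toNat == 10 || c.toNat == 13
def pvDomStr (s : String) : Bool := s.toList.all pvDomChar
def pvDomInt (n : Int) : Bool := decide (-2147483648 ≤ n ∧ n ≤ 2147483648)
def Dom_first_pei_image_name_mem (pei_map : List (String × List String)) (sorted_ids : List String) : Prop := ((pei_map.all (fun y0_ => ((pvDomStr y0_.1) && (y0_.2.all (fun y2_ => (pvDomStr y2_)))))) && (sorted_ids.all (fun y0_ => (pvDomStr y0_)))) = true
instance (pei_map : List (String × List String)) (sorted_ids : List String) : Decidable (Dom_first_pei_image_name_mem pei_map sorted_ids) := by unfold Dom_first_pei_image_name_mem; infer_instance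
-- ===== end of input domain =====

-- B replaces intersection-then-min by a sorted scan of the first id's set with
-- membership tests in the other sets (alternative decomposition; same results).

-- ===== PORT A =====
def first_pei_image_name_mem (pei_map : List (String × List String)) (sorted_ids : List String) : Option String :=
  match sorted_ids with
  | [] => none
  | _ :: _ =>
    let sets : List (PySem.Set String) :=
      sorted_ids.map (fun pid => (PySem.Dict.mk pei_map).getD pid PySem.Set.empty)
    match sets with
    | [] => none  -- unreachable: sorted_ids is nonempty
    | s0 :: rest =>
      let inter := rest.foldl PySem.Set.inter s0
      if inter = [] then none else PySem.List.min? inter (fun x => x)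

-- ===== PORT B =====
def first_pei_image_name_mem_alt (pei_map : List (String × List String)) (sorted_ids : List String) : Option String :=
  match sorted_ids with
  | [] => none
  | pid0 :: restIds =>
    let others : List (PySem.Set String) :=
      restIds.map (fun pid => (PySem.Dict.mk pei_map).getD pid PySem.Set.empty)
    -- 'for name in sorted(...): if all(...): return name' / 'return None' = find?
    (PySem.List.sorted ((PySem.Dict.mk pei_map).getD pid0 PySem.Set.empty) (fun x => x) false).find?
      (fun name => others.all (fun s => PySem.Set.contains s name))

-- ===== PRECONDITION & SPEC =====
def Spec_first_pei_image_name_mem (pei_map : List (String × List String)) (sorted_ids : List String) (out : Option String) : Prop := out = first_pei_image_name_mem_alt pei_map sorted_ids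
instance (pei_map : List (String × List String)) (sorted_ids : List String) (out : Option String) : Decidable (Spec_first_pei_image_name_mem pei_map sorted_ids out) := by unfold Spec_first_pei_image_name_mem; infer_instance

-- ===== CLAIM (what is proved, stated in full; the proofs are below) =====
def Claim_equal_first_pei_image_name_mem : Prop := ∀ (pei_map : List (String × List String)) (sorted_ids : List String), Dom_first_pei_image_name_mem pei_map sorted_ids → Spec_first_pei_image_name_mem pei_map sorted_ids (first_pei_image_name_mem pei_map sorted_ids)

-- ===== LEMMAS AND PROOFS =====

-- folding set intersection = filtering the first set by membership in all the rest
theorem pv_foldl_inter (rest : List (PySem.Set String)) (s0 : PySem.Set String) :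
    rest.foldl PySem.Set.inter s0
      = s0.filter (fun x => rest.all (fun s => PySem.Set.contains s x)) := by
  induction rest generalizing s0 with
  | nil => simp
  | cons s rest ih =>
    simp only [List.foldl_cons, ih, PySem.Set.inter, List.filter_filter, List.all_cons]
    simp [Bool.and_comm]

theorem pv_find?_eq_head?_filter {α : Type} (p : α → Bool) (l : List α) :
    l.find? p = (l.filter p).head? := by
  induction l with
  | nil => rfl
  | cons x t ih =>
    by_cases h : p x = true
    · simp [h]
    · simp only [Bool.not_eq_true] at h
      rw [List.find?_cons_of_neg (by simp [h]), List.filter_cons_of_neg (by simp [h])]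
      exact ih

-- core: scanning the sorted list for the first element satisfying p gives
-- min of the filtered list (none when the filtered list is empty)
theorem pv_find_sorted_eq_min_filter (s0 : List String) (p : String → Bool) :
    (PySem.List.sorted s0 (fun x => x) false).find? p
      = (if s0.filter p = [] then none else PySem.List.min? (s0.filter p) (fun x => x)) := by
  rw [pv_find?_eq_head?_filter]
  have hperm : ((PySem.List.sorted s0 (fun x => x) false).filter p).Perm (s0.filter p) :=
    (PySem.List.sorted_perm s0 (fun x => x) false).filter p
  by_cases hnil : s0.filter p = []
  · simp [hnil, List.Perm.eq_nil (hnil ▸ hperm)]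
  · simp only [hnil, if_false]
    -- the filtered sorted list is nonempty
    have hne : (PySem.List.sorted s0 (fun x => x) false).filter p ≠ [] := by
      intro h; exact hnil (List.Perm.eq_nil (h ▸ hperm).symm)
    obtain ⟨h0, t, hft⟩ := List.exists_cons_of_ne_nil hne
    obtain ⟨v, hv⟩ : ∃ v, PySem.List.min? (s0.filter p) (fun x => x) = some v := by
      cases hm : PySem.List.min? (s0.filter p) (fun x => x) with
      | none => exact absurd ((PySem.List.min?_eq_none_iff _ _).1 hm) hnil
      | some v => exact ⟨v, rfl⟩
    rw [hft, hv]
    -- h0 is ≤ everything in the filtered list (sortedness survives filtering)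
    have hpw : ((PySem.List.sorted s0 (fun x => x) false).filter p).Pairwise (· ≤ ·) :=
      (PySem.List.sorted_pairwise s0 (fun x => x)).filter p
    rw [hft] at hpw
    have h0le : ∀ y ∈ s0.filter p, h0 ≤ y := by
      intro y hy
      rcases (hperm.mem_iff).2 hy with hmem
      rw [hft] at hmem
      rcases List.mem_cons.1 hmem with h | h
      · exact le_of_eq h.symm
      · exact (List.pairwise_cons.1 hpw).1 y h
    have hvle : v ≤ h0 := PySem.List.min?_isMin hv h0 ((hperm.mem_iff).1 (hft ▸ List.mem_cons_self))
    have hle : h0 ≤ v := h0le v (PySem.List.min?_mem hv)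
    simp [le_antisymm hle hvle]

-- ===== VERDICT (by name: the statement is the Claim_ definition above) =====
theorem first_pei_image_name_mem_spec : Claim_equal_first_pei_image_name_mem := by
  intro pei_map sorted_ids _
  unfold Spec_first_pei_image_name_mem first_pei_image_name_mem first_pei_image_name_mem_alt
  cases sorted_ids with
  | nil => rfl
  | cons pid0 restIds =>
    simp only [List.map_cons]
    rw [pv_foldl_inter, pv_find_sorted_eq_min_filter]
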